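-- pv_equiv track=rewrite | github.com/victorziv/korak | krabby/webapp/api_1_0/session.py | calculate_session_state
-- ===== SOURCE A (Python) =====
-- def calculate_session_state(states):
--     if all([s == 'finished' for s in states]):
--         return "finished"
--
--     if all([s == 'pending' for s in states]):
--         return "pending"
--
--     if 'running' in states:
--         return 'running'
--
--     elif len(set(['onhold', 'finished', 'aborted']).intersection(set(states))):
--         return 'onhold'
--
--     return 'unknown'
-- ===== SOURCE B (Python) =====
-- def calculate_session_state(states):
--     all_fin, all_pen, has_run, has_hold = True, True, False, False
--     for s in states:
--         all_fin = all_fin and s == 'finished'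
--         all_pen = all_pen and s == 'pending'
--         has_run = has_run or s == 'running'
--         has_hold = has_hold or s in ('onhold', 'finished', 'aborted')
--     if all_fin:
--         return 'finished'
--     if all_pen:
--         return 'pending'
--     if has_run:
--         return 'running'
--     if has_hold:
--         return 'onhold'
--     return 'unknown'
-- ===== Notes on version B (the rewrite author's own statement) =====
-- stated objective: alternative
-- what changed: Replaces A's four staged full-list scans (two list comprehensions with all(), a membership scan and a set intersection) with a single pass over the list maintaining four boolean flags in an accumulator, deciding the state from the flags afterwards.
import Mathlib
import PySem

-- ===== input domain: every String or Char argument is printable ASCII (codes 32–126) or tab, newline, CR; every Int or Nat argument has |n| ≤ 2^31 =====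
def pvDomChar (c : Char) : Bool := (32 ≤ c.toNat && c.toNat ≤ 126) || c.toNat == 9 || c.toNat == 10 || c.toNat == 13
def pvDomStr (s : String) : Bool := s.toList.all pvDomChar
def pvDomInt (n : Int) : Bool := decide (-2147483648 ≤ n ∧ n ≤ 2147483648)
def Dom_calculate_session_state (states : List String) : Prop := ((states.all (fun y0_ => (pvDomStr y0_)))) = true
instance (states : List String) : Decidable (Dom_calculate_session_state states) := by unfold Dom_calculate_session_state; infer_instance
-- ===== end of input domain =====

-- B replaces A's four staged full-list scans with a single pass maintaining four boolean flags, deciding the state from the flags (objective: alternative).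

-- ===== PORT A =====
def calculate_session_state (states : List String) : String :=
  if (states.map (fun s => s == "finished")).all id then "finished"
  else if (states.map (fun s => s == "pending")).all id then "pending"
  else if states.contains "running" then "running"
  else if PySem.Set.len (PySem.Set.inter (PySem.Set.ofList ["onhold", "finished", "aborted"]) (PySem.Set.ofList states)) ≠ 0 then "onhold"
  else "unknown"

-- ===== PORT B =====
def pvStep (acc : Bool × Bool × Bool × Bool) (s : String) : Bool × Bool × Bool × Bool :=
  (acc.1 && s == "finished",
   acc.2.1 && s == "pending",
   acc.2.2.1 || s == "running",
   acc.2.2.2 || (s == "onhold" || s == "finished" || s == "aborted"))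

def calculate_session_state_alt (states : List String) : String :=
  let flags := states.foldl pvStep (true, true, false, false)
  if flags.1 then "finished"
  else if flags.2.1 then "pending"
  else if flags.2.2.1 then "running"
  else if flags.2.2.2 then "onhold"
  else "unknown"

-- ===== PRECONDITION & SPEC =====
def Spec_calculate_session_state (states : List String) (out : String) : Prop := out = calculate_session_state_alt states
instance (states : List String) (out : String) : Decidable (Spec_calculate_session_state states out) := by unfold Spec_calculate_session_state; infer_instance

-- ===== CLAIM (what is proved, stated in full; the proofs are below) =====
def Claim_equal_calculate_session_state : Prop := ∀ (states : List String), Dom_calculate_session_state states → Spec_calculate_session_state states (calculate_session_state states)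

-- ===== LEMMAS AND PROOFS =====

theorem pv_fold_char (states : List String) (af ap hr hh : Bool) :
    states.foldl pvStep (af, ap, hr, hh) =
      (af && states.all (fun s => s == "finished"),
       ap && states.all (fun s => s == "pending"),
       hr || states.any (fun s => s == "running"),
       hh || states.any (fun s => s == "onhold" || s == "finished" || s == "aborted")) := by
  induction states generalizing af ap hr hh with
  | nil => simp
  | cons x xs ih =>
    simp [List.foldl_cons, pvStep, ih, Bool.and_assoc, Bool.or_assoc]

theorem pv_inter_ne_iff_any (states : List String) :
    (PySem.Set.len (PySem.Set.inter (PySem.Set.ofList ["onhold", "finished", "aborted"]) (PySem.Set.ofList states)) ≠ 0) ↔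
    (states.any (fun s => s == "onhold" || s == "finished" || s == "aborted")) = true := by
  unfold PySem.Set.len
  rw [Int.natCast_ne_zero]
  simp only [ne_eq, List.length_eq_zero_iff, List.eq_nil_iff_forall_not_mem, not_forall, not_not]
  constructor
  · rintro ⟨x, hx⟩
    simp only [PySem.Set.mem_inter, PySem.Set.mem_ofList] at hx
    rw [List.any_eq_true]
    obtain ⟨h1, h2⟩ := hx
    refine ⟨x, h2, ?_⟩
    simp only [List.mem_cons] at h1
    rcases h1 with h | h | h | h <;> simp_all
  · rw [List.any_eq_true]
    rintro ⟨x, hmem, hx⟩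
    refine ⟨x, ?_⟩
    simp only [PySem.Set.mem_inter, PySem.Set.mem_ofList]
    refine ⟨?_, hmem⟩
    rcases Bool.or_eq_true_iff.mp hx with h | h
    · rcases Bool.or_eq_true_iff.mp h with h | h <;> simp_all
    · simp_all

-- ===== VERDICT (by name: the statement is the Claim_ definition above) =====
theorem calculate_session_state_spec : Claim_equal_calculate_session_state := by
  intro states _
  unfold Spec_calculate_session_state calculate_session_state calculate_session_state_alt
  rw [pv_fold_char]
  simp only [Bool.true_and, Bool.false_or]
  have hfin : ((states.map (fun s => s == "finished")).all id) = states.all (fun s => s == "finished") := by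
    simp [List.all_map]
  have hpen : ((states.map (fun s => s == "pending")).all id) = states.all (fun s => s == "pending") := by
    simp [List.all_map]
  have hrun : (states.contains "running") = states.any (fun s => s == "running") := by
    rw [Bool.eq_iff_iff]
    simp only [List.contains_iff_exists_mem_beq, List.any_eq_true, beq_iff_eq]
    constructor
    · rintro ⟨x, hm, hx⟩; exact ⟨x, hm, by simp [hx.symm]⟩
    · rintro ⟨x, hm, hx⟩; exact ⟨x, hm, by simp [hx]⟩
  rw [hfin, hpen, hrun]
  simp only [pv_inter_ne_iff_any]
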